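-- pv_equiv track=rewrite | github.com/cesarnml/mooc-programming-25 | part05-24_oldest_person/src/oldest_person.py | oldest_person
-- ===== SOURCE A (Python) =====
-- def oldest_person(people: list):
--     name = people[0][0]
--     oldest_person = people[0][1]
--     for person in people:
--         if person[1] < oldest_person:
--             oldest_person = person[1]
--             name = person[0]
--     return name
-- ===== SOURCE B (Python) =====
-- def oldest_person(people: list):
--     return sorted(people, key=lambda p: p[1])[0][0]
-- ===== Notes on version B (the rewrite author's own statement) =====
-- stated objective: alternative
-- what changed: Replaces the explicit linear min-scan loop with sort-by-year-then-take-first (stable sort preserves first-wins tie-breaking).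
import Mathlib
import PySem

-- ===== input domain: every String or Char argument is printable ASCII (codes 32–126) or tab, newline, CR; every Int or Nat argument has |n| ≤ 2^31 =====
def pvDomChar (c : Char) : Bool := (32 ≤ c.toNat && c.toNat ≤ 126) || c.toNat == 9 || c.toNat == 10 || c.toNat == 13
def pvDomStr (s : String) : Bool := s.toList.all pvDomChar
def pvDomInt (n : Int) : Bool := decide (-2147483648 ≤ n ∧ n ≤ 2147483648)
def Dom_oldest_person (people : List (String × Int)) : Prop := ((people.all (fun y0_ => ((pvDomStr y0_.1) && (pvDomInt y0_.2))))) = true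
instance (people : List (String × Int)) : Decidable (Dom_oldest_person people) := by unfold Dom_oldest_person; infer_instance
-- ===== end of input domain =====

-- B replaces A's linear min-scan with sort-by-year-then-take-first (stable sort keeps first-wins ties); alternative decomposition, not faster.


-- ===== PORT A =====
-- A: initialize from people[0], then scan with strict '<' keeping the first minimum.
def oldest_person (people : List (String × Int)) : String :=
  match people with
  | [] => ""  -- people[0] raises IndexError here; excluded by Pre_
  | p :: _ =>
    (people.foldl
      (fun (acc : String × Int) person =>
        if person.2 < acc.2 then (person.1, person.2) else acc)
      (p.1, p.2)).1

-- ===== PORT B =====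
-- B: stable sort by year, take the first element's name.
def oldest_person_alt (people : List (String × Int)) : String :=
  match PySem.List.sorted people (fun p => p.2) with
  | [] => ""  -- indexing [0] raises IndexError here; excluded by Pre_
  | m :: _ => m.1

-- ===== PRECONDITION & SPEC =====
-- Pre_ excludes only the empty list, on which both Pythons raise IndexError.
def Pre_oldest_person (people : List (String × Int)) : Prop := people ≠ []
instance (people : List (String × Int)) : Decidable (Pre_oldest_person people) := by unfold Pre_oldest_person; infer_instance
def pvWitness_oldest_person : (List (String × Int)) := [("a", 3), ("b", 1)]

def Spec_oldest_person (people : List (String × Int)) (out : String) : Prop := out = oldest_person_alt people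
instance (people : List (String × Int)) (out : String) : Decidable (Spec_oldest_person people out) := by unfold Spec_oldest_person; infer_instance

-- ===== CLAIM (what is proved, stated in full; the proofs are below) =====
def Claim_equal_oldest_person : Prop := ∀ (people : List (String × Int)), Dom_oldest_person people → Pre_oldest_person people → Spec_oldest_person people (oldest_person people)

-- ===== LEMMAS AND PROOFS =====

-- A's scan step (first-wins strict-< minimum), eta-reduced.
def pvScan (acc person : String × Int) : String × Int :=
  if person.2 < acc.2 then person else acc

-- insertion step of PySem's stable sort, specialised to the year key
def pvIns (acc : List (String × Int)) (x : String × Int) : List (String × Int) :=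
  PySem.List.insertBy (fun a b => decide (a.2 < b.2)) x acc

-- Head of the insertion-sort fold equals A's min-scan.
theorem head_foldl_insert (t : List (String × Int)) :
    ∀ (a : String × Int) (acc : List (String × Int)),
      (t.foldl pvIns (a :: acc)).head? = some (t.foldl pvScan a) := by
  induction t with
  | nil => intro a acc; rfl
  | cons x t ih =>
    intro a acc
    simp only [List.foldl_cons]
    by_cases h : x.2 < a.2
    · have h1 : pvIns (a :: acc) x = x :: a :: acc := by
        simp [pvIns, PySem.List.insertBy, h]
      have h2 : pvScan a x = x := by simp [pvScan, h]
      rw [h1, h2]; exact ih x (a :: acc)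
    · have h1 : pvIns (a :: acc) x =
          a :: PySem.List.insertBy (fun a b => decide (a.2 < b.2)) x acc := by
        simp [pvIns, PySem.List.insertBy, h]
      have h2 : pvScan a x = a := by simp [pvScan, h]
      rw [h1, h2]; exact ih a _

theorem oldest_eq (p : String × Int) (t : List (String × Int)) :
    oldest_person (p :: t) = oldest_person_alt (p :: t) := by
  -- A side: first iteration compares p with itself and keeps it.
  have hA : oldest_person (p :: t) = (t.foldl pvScan p).1 := by
    simp only [oldest_person, List.foldl_cons]
    rw [if_neg (lt_irrefl p.2)]; rfl
  -- B side: sorted = foldl insertBy, whose head is the min-scan value.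
  have hs : PySem.List.sorted (p :: t) (fun q => q.2) = t.foldl pvIns [p] := by
    rw [PySem.List.sorted_eq_foldl_insertBy]
    simp only [List.foldl_cons]
    rfl
  have hh : (t.foldl pvIns (p :: [])).head? = some (t.foldl pvScan p) :=
    head_foldl_insert t p []
  cases hE : t.foldl pvIns [p] with
  | nil => rw [hE] at hh; simp at hh
  | cons m rest =>
    rw [hE] at hh
    simp only [List.head?] at hh
    have hm : m = t.foldl pvScan p := by injection hh
    have halt : oldest_person_alt (p :: t) = m.1 := by
      simp only [oldest_person_alt, hs, hE]
    rw [hA, halt, hm]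

-- ===== VERDICT (by name: the statement is the Claim_ definition above) =====
theorem oldest_person_spec : Claim_equal_oldest_person := by
  intro people _ hpre
  unfold Spec_oldest_person
  cases people with
  | nil => exact absurd rfl hpre
  | cons p t => exact oldest_eq p t
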